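-- pv_equiv track=rewrite | github.com/uercal/SecretComputer | txtHelper.py | listForInterBind
-- ===== SOURCE A (Python) =====
-- def listForInterBind(list):
--     bindSet = set()
--     for item in list:
--         resultSet = set()
--         for i in range(0, len(item)):
--             if i == 0:
--                 resultSet = set(item[i])
--             else:
--                 resultSet = resultSet & set(item[i])
--         bindSet = bindSet | resultSet
--     return bindSet
-- ===== SOURCE B (Python) =====
-- def listForInterBind(list):
--     bindSet = set()
--     for item in list:
--         counts = {}
--         for elem in item:
--             for ch in set(elem):
--                 counts[ch] = counts.get(ch, 0) + 1
--         bindSet |= {ch for ch, c in counts.items() if c == len(item)}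
--     return bindSet
-- ===== Notes on version B (the rewrite author's own statement) =====
-- stated objective: alternative
-- what changed: Replaces A's pairwise set-intersection loop per item by a single frequency-counting pass (a dict counting in how many elements' character sets each character occurs) followed by a threshold selection count == len(item), unioned into the result.
import Mathlib
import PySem

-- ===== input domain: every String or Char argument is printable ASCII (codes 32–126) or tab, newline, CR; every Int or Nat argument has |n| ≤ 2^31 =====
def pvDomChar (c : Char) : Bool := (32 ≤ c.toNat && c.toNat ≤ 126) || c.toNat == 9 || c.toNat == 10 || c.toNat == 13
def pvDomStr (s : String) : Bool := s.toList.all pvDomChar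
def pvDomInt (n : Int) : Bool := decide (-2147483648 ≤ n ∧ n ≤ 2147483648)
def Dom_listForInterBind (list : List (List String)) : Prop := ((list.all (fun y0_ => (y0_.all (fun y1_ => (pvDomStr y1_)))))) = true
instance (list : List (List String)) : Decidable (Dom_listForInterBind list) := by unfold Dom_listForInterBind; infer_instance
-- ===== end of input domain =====

-- B replaces A's pairwise set-intersection loop over each item by one frequency-counting
-- pass (a dict counting, per element's distinct characters, how many elements contain each
-- character) plus a threshold selection (count == len(item)); objective: alternative.

-- set(s) for a Python string s: the set of its characters (as 1-character strings)
def pyStrSet (s : String) : PySem.Set String :=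
  PySem.Set.ofList (s.toList.map (fun c => String.ofList [c]))

-- ===== PORT A =====
def listForInterBind (list : List (List String)) : List String :=
  list.foldl (fun bindSet item =>
    PySem.Set.union bindSet
      ((PySem.List.pyRange 0 (PySem.List.len item)).foldl
        (fun resultSet i =>
          if i == 0 then pyStrSet (PySem.List.pyGetD item i "")
          else PySem.Set.inter resultSet (pyStrSet (PySem.List.pyGetD item i "")))
        PySem.Set.empty))
    PySem.Set.empty

-- ===== PORT B =====
def listForInterBind_alt (list : List (List String)) : List String :=
  list.foldl (fun bindSet item =>
    let counts : PySem.Dict String Int :=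
      item.foldl (fun d elem =>
        (pyStrSet elem).foldl (fun d ch => d.insert ch (d.getD ch 0 + 1)) d)
        PySem.Dict.empty
    PySem.Set.union bindSet
      ((counts.items.filter (fun p => p.2 == PySem.List.len item)).map (fun p => p.1)))
    PySem.Set.empty

-- ===== PRECONDITION & SPEC =====
def Spec_listForInterBind (list : List (List String)) (out : List String) : Prop := out = listForInterBind_alt list
instance (list : List (List String)) (out : List String) : Decidable (Spec_listForInterBind list out) := by unfold Spec_listForInterBind; infer_instance

-- ===== CLAIM (what is proved, stated in full; the proofs are below) =====
def Claim_equal_listForInterBind : Prop := ∀ (list : List (List String)), Dom_listForInterBind list → Spec_listForInterBind list (listForInterBind list)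

-- ===== LEMMAS AND PROOFS =====

-- A's inner fold of intersections is a filter of the first set by membership in all the rest
theorem foldl_inter_eq_filter (rest : List String) (acc : PySem.Set String) :
    rest.foldl (fun rs s => PySem.Set.inter rs (pyStrSet s)) acc
      = acc.filter (fun ch => rest.all (fun s => PySem.Set.contains (pyStrSet s) ch)) := by
  induction rest generalizing acc with
  | nil => simp
  | cons s rest ih =>
      rw [List.foldl_cons, ih]
      simp only [PySem.Set.inter, List.filter_filter, List.all_cons]
      exact List.filter_congr (fun x _ => Bool.and_comm _ _)

-- A's range loop on a nonempty item
theorem innerA_cons (e : String) (rest : List String) :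
    (PySem.List.pyRange 0 (PySem.List.len (e :: rest))).foldl
        (fun resultSet i =>
          if i == 0 then pyStrSet (PySem.List.pyGetD (e :: rest) i "")
          else PySem.Set.inter resultSet (pyStrSet (PySem.List.pyGetD (e :: rest) i "")))
        PySem.Set.empty
      = (pyStrSet e).filter (fun ch => rest.all (fun s => PySem.Set.contains (pyStrSet s) ch)) := by
  have h0 : (0 : Int) < PySem.List.len (e :: rest) := by
    simp [PySem.List.len_eq]
  rw [PySem.List.pyRange_one_cons h0, List.foldl_cons]
  have hstep : ((0 : Int) == 0) = true := by decide
  rw [hstep]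
  simp only [if_true, PySem.List.pyGetD_ofNat', List.getD_cons_zero, zero_add]
  rw [PySem.List.foldl_congr_mem _ _
      (fun resultSet i => PySem.Set.inter resultSet (pyStrSet (PySem.List.pyGetD (e :: rest) i "")))
      _ (by
        intro acc x hx
        have hb := PySem.List.mem_pyRange_one.mp hx
        have : (x == 0) = false := by simp; omega
        rw [this]; simp)]
  rw [PySem.List.foldl_pyRange_pyGetD (e :: rest) ""
      (fun rs s => PySem.Set.inter rs (pyStrSet s)) (pyStrSet e) (by norm_num : (0:Int) ≤ 1)]
  simp only [Int.toNat_one, List.drop_succ_cons, List.drop_zero]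
  exact foldl_inter_eq_filter rest (pyStrSet e)

-- the counting dict's lookups: the count of ch is the number of elements whose char set contains ch
theorem counts_getD (item : List String) (d : PySem.Dict String Int) (ch : String) :
    (item.foldl (fun d elem =>
        (pyStrSet elem).foldl (fun d ch => d.insert ch (d.getD ch 0 + 1)) d) d).getD ch 0
      = d.getD ch 0 + (item.countP (fun s => PySem.Set.contains (pyStrSet s) ch) : Int) := by
  induction item generalizing d with
  | nil => simp
  | cons e item ih =>
      simp only [List.foldl_cons, ih, PySem.Dict.getD_foldl_insert_add_one, List.countP_cons]
      have hn : (pyStrSet e).Nodup := PySem.Set.nodup_ofList _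
      by_cases h : ch ∈ pyStrSet e
      · rw [List.count_eq_one_of_mem hn h, if_pos ((PySem.Set.contains_iff _ _).mpr h)]
        push_cast; ring
      · rw [List.count_eq_zero_of_not_mem h,
          if_neg (fun hc => h ((PySem.Set.contains_iff _ _).mp hc))]
        push_cast; ring

theorem update_ofList (s : PySem.Set String) (xs : List String) :
    PySem.Set.update s (PySem.Set.ofList xs) = PySem.Set.update s xs := by
  rw [PySem.Set.update_eq_append_filter, PySem.Set.update_eq_append_filter,
    PySem.Set.ofList_ofList]

-- the counting dict's keys
theorem counts_keys (item : List String) (d : PySem.Dict String Int) :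
    (item.foldl (fun d elem =>
        (pyStrSet elem).foldl (fun d ch => d.insert ch (d.getD ch 0 + 1)) d) d).keys
      = PySem.Set.update d.keys (item.flatMap (fun s => s.toList.map (fun c => String.ofList [c]))) := by
  induction item generalizing d with
  | nil => simp
  | cons e item ih =>
      simp only [List.foldl_cons, ih, PySem.Dict.keys_foldl_insert, List.flatMap_cons,
        PySem.Set.update_append]
      rw [show pyStrSet e = PySem.Set.ofList (e.toList.map (fun c => String.ofList [c])) from rfl,
        update_ofList]

-- per item, A's intersection equals B's threshold selection (as lists)
theorem inner_eq (item : List String) :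
    (PySem.List.pyRange 0 (PySem.List.len item)).foldl
        (fun resultSet i =>
          if i == 0 then pyStrSet (PySem.List.pyGetD item i "")
          else PySem.Set.inter resultSet (pyStrSet (PySem.List.pyGetD item i "")))
        PySem.Set.empty
      = ((item.foldl (fun d elem =>
            (pyStrSet elem).foldl (fun d ch => d.insert ch (d.getD ch 0 + 1)) d)
            PySem.Dict.empty).items.filter (fun p => p.2 == PySem.List.len item)).map
          (fun p => p.1) := by
  cases item with
  | nil => rfl
  | cons e rest =>
      rw [innerA_cons]
      have hkeys : (((e :: rest).foldl (fun d elem =>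
            (pyStrSet elem).foldl (fun d ch => d.insert ch (d.getD ch 0 + 1)) d)
            (PySem.Dict.empty : PySem.Dict String Int))).keys
          = PySem.Set.ofList ((e.toList.map (fun c => String.ofList [c]))
              ++ rest.flatMap (fun s => s.toList.map (fun c => String.ofList [c]))) := by
        have h := counts_keys (e :: rest) PySem.Dict.empty
        rw [List.flatMap_cons] at h
        exact h
      have hnd : (((e :: rest).foldl (fun d elem =>
            (pyStrSet elem).foldl (fun d ch => d.insert ch (d.getD ch 0 + 1)) d)
            (PySem.Dict.empty : PySem.Dict String Int))).keys.Nodup :=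
        hkeys ▸ PySem.Set.nodup_ofList _
      have hitems := PySem.Dict.items_eq_map_keys _ hnd 0
      rw [hitems, List.filter_map, List.map_map]
      have hfst : ∀ g : String → String × Int, (∀ k, (g k).1 = k) →
          List.map ((fun p : String × Int => p.1) ∘ g) = List.map id := by
        intro g hg; funext l; exact List.map_congr_left (fun k _ => hg k)
      rw [hfst _ (fun k => rfl), List.map_id, hkeys, PySem.Set.ofList_append,
        PySem.Set.update_eq_append_filter, List.filter_append]
      have hcount : ∀ ch, (((e :: rest).foldl (fun d elem =>
            (pyStrSet elem).foldl (fun d ch => d.insert ch (d.getD ch 0 + 1)) d)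
            (PySem.Dict.empty : PySem.Dict String Int))).getD ch 0
          = ((e :: rest).countP (fun s => PySem.Set.contains (pyStrSet s) ch) : Int) := by
        intro ch; rw [counts_getD]; simp
      have hextra : List.filter
          ((fun p : String × Int => p.2 == PySem.List.len (e :: rest)) ∘ (fun k =>
            (k, (((e :: rest).foldl (fun d elem =>
              (pyStrSet elem).foldl (fun d ch => d.insert ch (d.getD ch 0 + 1)) d)
              (PySem.Dict.empty : PySem.Dict String Int))).getD k 0)))
          (List.filter (fun y => !(PySem.Set.ofList (e.toList.map (fun c => String.ofList [c]))).contains y)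
            (PySem.Set.ofList (rest.flatMap fun s => s.toList.map fun c => String.ofList [c]))) = [] := by
        rw [List.filter_eq_nil_iff]
        intro y hy
        have hym := List.of_mem_filter hy
        have hc0 : (pyStrSet e).contains y = false := by
          simpa [pyStrSet] using hym
        have hle := List.countP_le_length (p := fun s => PySem.Set.contains (pyStrSet s) y) (l := rest)
        simp only [Function.comp, hcount, PySem.List.len_eq, List.countP_cons, hc0,
          beq_iff_eq, Bool.false_eq_true, if_false, Nat.add_zero, List.length_cons]
        intro heq
        push_cast at heq
        omega
      rw [hextra, List.append_nil]
      apply List.filter_congr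
      intro ch hch
      have hc1 : (PySem.Set.contains (pyStrSet e) ch) = true := (PySem.Set.contains_iff _ _).mpr hch
      rw [Bool.eq_iff_iff]
      simp only [Function.comp, hcount, PySem.List.len_eq, List.countP_cons, hc1,
        List.all_eq_true, beq_iff_eq, if_true, List.length_cons]
      have hle := List.countP_le_length (p := fun s => PySem.Set.contains (pyStrSet s) ch) (l := rest)
      rw [← List.countP_eq_length (p := fun s => PySem.Set.contains (pyStrSet s) ch)]
      omega

-- ===== VERDICT (by name: the statement is the Claim_ definition above) =====
theorem listForInterBind_spec : Claim_equal_listForInterBind := by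
  intro list _
  unfold Spec_listForInterBind listForInterBind listForInterBind_alt
  simp only [inner_eq]
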